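-- pv_equiv track=rewrite | github.com/Ethanlita/LitaAgent | litaagent_std/inventory_manager_ns.py | jit_production_plan_abs
-- ===== SOURCE A (Python) =====
-- from typing import List, Dict, Optional
--
-- def jit_production_plan_abs(
--
--         start_day: int,
--         horizon: int,
--         capacity: int,
--         inv_raw: int,
--         inv_prod: int,
--         future_raw_deliver: Dict[int, int],
--         future_prod_deliver: Dict[int, int]
-- ) -> Dict[int, int]:
--     """
--     JIT 生产计划算法（绝对时间版）
--     JIT production planning algorithm (absolute time version)
--
--     Args:
--         start_day: 开始日期 Start day
--         horizon: 规划天数 Planning horizon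
--         capacity: 日产能 Daily production capacity
--         inv_raw: 当前原材料库存 Current raw material inventory
--         inv_prod: 当前产品库存 Current product inventory
--         future_raw_deliver: 未来原材料到货 {day: quantity} Future raw material delivery
--         future_prod_deliver: 未来产品交付 {day: quantity} Future product delivery
--
--     Returns:
--         Dict[int, int]: 生产计划 {day: quantity} Production plan
--     """
--     # 初始化生产计划 Initialize production plan
--     plan = {}
--     # 初始化库存 Initialize inventory
--     raw = inv_raw
--     prod = inv_prod
--
--     # 按照交付日期倒序排列 Sort by delivery date in descending order
--     deliver_days = sorted(future_prod_deliver.keys(), reverse=True)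
--
--     # 对于每个交付日 For each delivery day
--     for d_day in deliver_days:
--         # 如果交付日在规划范围外，跳过 Skip if delivery day is outside planning horizon
--         if d_day < start_day or d_day >= start_day + horizon:
--             continue
--
--         # 当前交付日需求量 Current delivery day demand
--         demand = future_prod_deliver[d_day]
--
--         # 如果库存足够，直接从库存扣除 If inventory is sufficient, deduct from inventory
--         if prod >= demand:
--             prod -= demand
--             continue
--
--         # 否则，需要生产 Otherwise, need to produce
--         to_produce = demand - prod
--         prod = 0  # 库存已用完 Inventory is depleted
--
--         # 从交付日前一天开始，尽可能安排生产 Start from the day before delivery, schedule production as much as possible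
--         for p_day in range(d_day - 1, start_day - 1, -1):
--             # 当天可用产能 Available capacity for the day
--             avail_cap = capacity - plan.get(p_day, 0)
--             if avail_cap <= 0:
--                 continue
--
--             # 当天可用原材料 Available raw materials for the day
--             avail_raw = raw
--             for r_day in range(start_day, p_day + 1):
--                 avail_raw += future_raw_deliver.get(r_day, 0)
--
--             # 当天已安排生产 Production already scheduled for the day
--             for pp_day in range(start_day, p_day):
--                 avail_raw -= plan.get(pp_day, 0)
--
--             # 当天最多可生产 Maximum production for the day
--             max_prod = min(avail_cap, avail_raw, to_produce)
--             if max_prod <= 0: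
--                 continue
--
--             # 安排生产 Schedule production
--             plan[p_day] = plan.get(p_day, 0) + max_prod
--             to_produce -= max_prod
--
--             # 如果已经安排完，跳出 If all production is scheduled, break
--             if to_produce <= 0:
--                 break
--
--     return plan
-- ===== SOURCE B (Python) =====
-- def jit_production_plan_abs(
--         start_day,
--         horizon,
--         capacity,
--         inv_raw,
--         inv_prod,
--         future_raw_deliver,
--         future_prod_deliver,
-- ):
--     """Two-stage JIT plan: stage 1 nets the product inventory against the demands
--     (latest first) to get the list of shortfalls; stage 2 schedules each shortfall
--     backward from its delivery day, answering every availability question from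
--     prefix-sum arrays (one shared helper) instead of A's two per-day rescans."""
--     # stage 1: shortfalls, latest delivery day first
--     needs = []
--     prod = inv_prod
--     for d in sorted(future_prod_deliver, reverse=True):
--         if start_day <= d < start_day + horizon:
--             q = future_prod_deliver[d]
--             if prod < q:
--                 needs.append((d, q - prod))
--                 prod = 0
--             else:
--                 prod -= q
--     if not needs:
--         return {}
--
--     # prefix sums over the days start_day .. start_day+n-1 of a {day: qty} table
--     def prefix(table, n, init):
--         pre = [init]
--         for i in range(n):
--             pre.append(pre[-1] + table.get(start_day + i, 0))
--         return pre
--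
--     # raw_pre[k] = inv_raw + raw delivered on days start_day .. start_day+k-1;
--     # the first (= latest) shortfall day bounds every index stage 2 ever asks for
--     raw_pre = prefix(future_raw_deliver, needs[0][0] - start_day, inv_raw)
--
--     # stage 2: fill each shortfall backward from the day before its delivery
--     plan = {}
--     for d, todo in needs:
--         sched_pre = prefix(plan, d - start_day, 0)
--         for p in range(d - 1, start_day - 1, -1):
--             room = capacity - plan.get(p, 0)
--             if room > 0:
--                 i = p - start_day
--                 take = min(room, raw_pre[i + 1] - sched_pre[i], todo)
--                 if take > 0:
--                     plan[p] = plan.get(p, 0) + take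
--                     todo -= take
--     return plan
-- ===== Notes on version B (the rewrite author's own statement) =====
-- stated objective: alternative
-- what changed: Re-decomposes A's fused loop into two stages - first a pass that nets product inventory against demands to a shortfall list, then a backward-fill pass per shortfall - with prefix-sum arrays (one shared helper) answering every availability question that A recomputes with two inner scans per candidate day.
import Mathlib
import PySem

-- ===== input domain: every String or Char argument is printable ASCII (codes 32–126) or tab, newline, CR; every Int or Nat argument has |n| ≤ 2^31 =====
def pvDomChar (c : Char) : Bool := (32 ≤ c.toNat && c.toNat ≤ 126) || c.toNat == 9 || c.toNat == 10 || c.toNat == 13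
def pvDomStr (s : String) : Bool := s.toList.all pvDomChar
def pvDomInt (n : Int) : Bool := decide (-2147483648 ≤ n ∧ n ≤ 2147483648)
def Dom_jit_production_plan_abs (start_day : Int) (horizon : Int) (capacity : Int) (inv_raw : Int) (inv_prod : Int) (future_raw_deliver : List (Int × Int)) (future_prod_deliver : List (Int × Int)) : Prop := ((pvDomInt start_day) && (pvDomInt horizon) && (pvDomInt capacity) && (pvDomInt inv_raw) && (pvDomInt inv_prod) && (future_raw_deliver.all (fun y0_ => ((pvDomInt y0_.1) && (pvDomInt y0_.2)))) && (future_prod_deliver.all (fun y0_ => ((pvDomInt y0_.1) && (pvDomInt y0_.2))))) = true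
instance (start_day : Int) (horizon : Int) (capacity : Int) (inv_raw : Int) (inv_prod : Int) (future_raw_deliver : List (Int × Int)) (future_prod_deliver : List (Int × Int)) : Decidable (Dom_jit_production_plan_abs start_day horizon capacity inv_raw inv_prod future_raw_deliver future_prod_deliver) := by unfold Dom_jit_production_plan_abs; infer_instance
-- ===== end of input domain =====

-- B is a two-stage re-decomposition (shortfall pass, then backward fill) with prefix-sum
-- arrays replacing A's two per-candidate-day rescans — an alternative exact re-implementation.
-- ===== PORT A =====
-- transliteration of A: backward greedy over delivery days; for each production day the
-- available raw material is recomputed by two full scans (the two inner `for` loops).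
-- `future_prod_deliver[d_day]` is written `getD … 0`: d_day comes from the dict's keys, so the
-- lookup never misses and the default is never used.
def pvAInner (capacity raw start_day : Int) (fr : PySem.Dict Int Int) :
    List Int → PySem.Dict Int Int → Int → PySem.Dict Int Int × Int
  | [], plan, tp => (plan, tp)
  | p :: rest, plan, tp =>
    let avail_cap := capacity - plan.getD p 0
    if avail_cap ≤ 0 then pvAInner capacity raw start_day fr rest plan tp
    else
      let avail_raw :=
        (PySem.List.pyRange start_day p 1).foldl (fun acc pp => acc - plan.getD pp 0)
          ((PySem.List.pyRange start_day (p + 1) 1).foldl (fun acc r => acc + fr.getD r 0) raw)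
      let max_prod := min avail_cap (min avail_raw tp)
      if max_prod ≤ 0 then pvAInner capacity raw start_day fr rest plan tp
      else
        let plan' := plan.insert p (plan.getD p 0 + max_prod)
        let tp' := tp - max_prod
        if tp' ≤ 0 then (plan', tp') else pvAInner capacity raw start_day fr rest plan' tp'

def pvAOuter (start_day horizon capacity raw : Int) (fr fpd : PySem.Dict Int Int) :
    List Int → PySem.Dict Int Int → Int → PySem.Dict Int Int
  | [], plan, _ => plan
  | d :: rest, plan, prod =>
    if d < start_day ∨ start_day + horizon ≤ d then
      pvAOuter start_day horizon capacity raw fr fpd rest plan prod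
    else
      let demand := fpd.getD d 0
      if demand ≤ prod then
        pvAOuter start_day horizon capacity raw fr fpd rest plan (prod - demand)
      else
        let r := pvAInner capacity raw start_day fr
          (PySem.List.pyRange (d - 1) (start_day - 1) (-1)) plan (demand - prod)
        pvAOuter start_day horizon capacity raw fr fpd rest r.1 0

def jit_production_plan_abs (start_day : Int) (horizon : Int) (capacity : Int) (inv_raw : Int) (inv_prod : Int) (future_raw_deliver : List (Int × Int)) (future_prod_deliver : List (Int × Int)) : List (Int × Int) :=
  let fr := PySem.Dict.ofList future_raw_deliver
  let fpd := PySem.Dict.ofList future_prod_deliver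
  let days := PySem.List.sorted fpd.keys (fun x => x) true
  (pvAOuter start_day horizon capacity inv_raw fr fpd days PySem.Dict.empty inv_prod).items

-- ===== PORT B =====
-- transliteration of B (Source B): stage 1 (pvBNeeds) nets inventory against demands to a
-- shortfall list; one shared prefix-sum helper (pvBPrefix = Source B's `prefix`); stage 2
-- (pvBSched) folds each shortfall's backward fill (pvBFill/pvBStep, the inner for-loop
-- body) over the candidate days.  List indices are always in range in Source B; ported as
-- pyGet? with default 0.
def pvBNeeds (start_day horizon : Int) (fpd : PySem.Dict Int Int) :
    List Int → Int → List (Int × Int)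
  | [], _ => []
  | d :: rest, prod =>
    if start_day ≤ d ∧ d < start_day + horizon then
      let q := fpd.getD d 0
      if prod < q then (d, q - prod) :: pvBNeeds start_day horizon fpd rest 0
      else pvBNeeds start_day horizon fpd rest (prod - q)
    else pvBNeeds start_day horizon fpd rest prod

def pvBPrefix (table : PySem.Dict Int Int) : Nat → Int → Int → List Int
  | 0, _, acc => [acc]
  | n + 1, day, acc => acc :: pvBPrefix table n (day + 1) (acc + table.getD day 0)

def pvBStep (capacity start_day : Int) (rawPre schedPre : List Int)
    (st : PySem.Dict Int Int × Int) (p : Int) : PySem.Dict Int Int × Int :=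
  let room := capacity - st.1.getD p 0
  if 0 < room then
    let take := min room (min ((PySem.List.pyGet? rawPre (p - start_day + 1)).getD 0
      - (PySem.List.pyGet? schedPre (p - start_day)).getD 0) st.2)
    if 0 < take then (st.1.insert p (st.1.getD p 0 + take), st.2 - take) else st
  else st

def pvBFill (capacity start_day : Int) (rawPre schedPre : List Int)
    (ps : List Int) (plan : PySem.Dict Int Int) (todo : Int) : PySem.Dict Int Int :=
  (ps.foldl (pvBStep capacity start_day rawPre schedPre) (plan, todo)).1

def pvBSched (start_day capacity : Int) (rawPre : List Int) :
    List (Int × Int) → PySem.Dict Int Int → PySem.Dict Int Int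
  | [], plan => plan
  | (d, todo) :: rest, plan =>
    pvBSched start_day capacity rawPre rest
      (pvBFill capacity start_day rawPre (pvBPrefix plan (d - start_day).toNat start_day 0)
        (PySem.List.pyRange (d - 1) (start_day - 1) (-1)) plan todo)

def jit_production_plan_abs_alt (start_day : Int) (horizon : Int) (capacity : Int) (inv_raw : Int) (inv_prod : Int) (future_raw_deliver : List (Int × Int)) (future_prod_deliver : List (Int × Int)) : List (Int × Int) :=
  let fpd := PySem.Dict.ofList future_prod_deliver
  let needs := pvBNeeds start_day horizon fpd
    (PySem.List.sorted fpd.keys (fun x => x) true) inv_prod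
  match needs with
  | [] => []
  | (d0, _) :: _ =>
    let rawPre := pvBPrefix (PySem.Dict.ofList future_raw_deliver)
      (d0 - start_day).toNat start_day inv_raw
    (pvBSched start_day capacity rawPre needs PySem.Dict.empty).items

-- ===== PRECONDITION & SPEC =====
def Spec_jit_production_plan_abs (start_day : Int) (horizon : Int) (capacity : Int) (inv_raw : Int) (inv_prod : Int) (future_raw_deliver : List (Int × Int)) (future_prod_deliver : List (Int × Int)) (out : List (Int × Int)) : Prop := out = jit_production_plan_abs_alt start_day horizon capacity inv_raw inv_prod future_raw_deliver future_prod_deliver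
instance (start_day : Int) (horizon : Int) (capacity : Int) (inv_raw : Int) (inv_prod : Int) (future_raw_deliver : List (Int × Int)) (future_prod_deliver : List (Int × Int)) (out : List (Int × Int)) : Decidable (Spec_jit_production_plan_abs start_day horizon capacity inv_raw inv_prod future_raw_deliver future_prod_deliver out) := by unfold Spec_jit_production_plan_abs; infer_instance

-- ===== CLAIM =====
def Claim_equal_jit_production_plan_abs : Prop := ∀ (start_day : Int) (horizon : Int) (capacity : Int) (inv_raw : Int) (inv_prod : Int) (future_raw_deliver : List (Int × Int)) (future_prod_deliver : List (Int × Int)), Dom_jit_production_plan_abs start_day horizon capacity inv_raw inv_prod future_raw_deliver future_prod_deliver → Spec_jit_production_plan_abs start_day horizon capacity inv_raw inv_prod future_raw_deliver future_prod_deliver (jit_production_plan_abs start_day horizon capacity inv_raw inv_prod future_raw_deliver future_prod_deliver)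

-- ===== LEMMAS AND PROOFS =====

-- the prefix array: entry i is the fold of the corresponding scan of A up to day+i-1
lemma pvBPrefix_get? (table : PySem.Dict Int Int) :
    ∀ (n : Nat) (day acc : Int) (i : Nat), i ≤ n →
    (pvBPrefix table n day acc)[i]? =
      some ((PySem.List.pyRange day (day + (i : Int)) 1).foldl
        (fun a pp => a + table.getD pp 0) acc) := by
  intro n
  induction n with
  | zero =>
    intro day acc i hi
    interval_cases i
    simp [pvBPrefix, PySem.List.pyRange_one_eq_nil (le_refl day)]
  | succ m ih =>
    intro day acc i hi
    cases i with
    | zero =>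
      simp [pvBPrefix, PySem.List.pyRange_one_eq_nil (le_refl day)]
    | succ j =>
      have h1 : (pvBPrefix table (m + 1) day acc)[j + 1]? =
          (pvBPrefix table m (day + 1) (acc + table.getD day 0))[j]? := by
        simp [pvBPrefix]
      rw [h1, ih (day + 1) (acc + table.getD day 0) j (by omega)]
      have h2 : day < day + ((j : Int) + 1) := by omega
      rw [show ((j + 1 : Nat) : Int) = (j : Int) + 1 by push_cast; ring]
      rw [PySem.List.pyRange_one_cons h2]
      have h3 : day + ((j : Int) + 1) = day + 1 + (j : Int) := by ring
      simp [h3]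

-- A's rescanned availability equals B's two prefix-array lookups, provided the live plan
-- agrees with the snapshot plan₀ on every day strictly before p
lemma avail_raw_eq (fr plan plan₀ : PySem.Dict Int Int) (start_day p raw : Int) (L Hp : Nat)
    (hp0 : start_day ≤ p) (hpL : p - start_day + 1 ≤ (L : Int)) (hpHp : p - start_day ≤ (Hp : Int))
    (hag : ∀ q, start_day ≤ q → q < p → plan.getD q 0 = plan₀.getD q 0) :
    (PySem.List.pyRange start_day p 1).foldl (fun acc pp => acc - plan.getD pp 0)
      ((PySem.List.pyRange start_day (p + 1) 1).foldl (fun acc r => acc + fr.getD r 0) raw)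
    = (PySem.List.pyGet? (pvBPrefix fr L start_day raw) (p - start_day + 1)).getD 0
      - (PySem.List.pyGet? (pvBPrefix plan₀ Hp start_day 0) (p - start_day)).getD 0 := by
  have hnn : (0 : Int) ≤ p - start_day := by omega
  have hnn1 : (0 : Int) ≤ p - start_day + 1 := by omega
  have hcast : ((p - start_day).toNat : Int) = p - start_day := Int.toNat_of_nonneg hnn
  have hcast1 : ((p - start_day + 1).toNat : Int) = p - start_day + 1 := Int.toNat_of_nonneg hnn1
  rw [PySem.List.pyGet?_of_nonneg _ hnn1, PySem.List.pyGet?_of_nonneg _ hnn]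
  rw [pvBPrefix_get? fr L start_day raw (p - start_day + 1).toNat (by omega),
      pvBPrefix_get? plan₀ Hp start_day 0 (p - start_day).toNat (by omega)]
  rw [hcast, hcast1]
  have e1 : start_day + (p - start_day + 1) = p + 1 := by ring
  have e2 : start_day + (p - start_day) = p := by ring
  rw [e1, e2]
  simp only [Option.getD_some]
  have hsub : (fun (acc pp : Int) => acc - plan.getD pp 0)
      = (fun acc pp => acc + (-(plan.getD pp 0))) := by
    funext acc pp; ring
  rw [hsub, PySem.List.foldl_add, PySem.List.foldl_add]
  have hmap : (PySem.List.pyRange start_day p 1).map (fun pp => -(plan.getD pp 0))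
      = (PySem.List.pyRange start_day p 1).map (fun pp => -(plan₀.getD pp 0)) := by
    apply List.map_congr_left
    intro q hq
    rw [PySem.List.mem_pyRange_one] at hq
    rw [hag q hq.1 hq.2]
  rw [hmap]
  have hneg : ((PySem.List.pyRange start_day p 1).map (fun pp => -(plan₀.getD pp 0))).sum
      = -((PySem.List.pyRange start_day p 1).map (fun pp => plan₀.getD pp 0)).sum := by
    induction PySem.List.pyRange start_day p 1 with
    | nil => simp
    | cons x t iht => simp [iht]; ring
  rw [hneg, PySem.List.foldl_add]
  ring

-- once the remaining shortfall is ≤ 0, B's fold no longer changes its state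
lemma fill_stuck (capacity start_day : Int) (rawPre schedPre : List Int) :
    ∀ (ps : List Int) (st : PySem.Dict Int Int × Int), st.2 ≤ 0 →
    ps.foldl (pvBStep capacity start_day rawPre schedPre) st = st := by
  intro ps
  induction ps with
  | nil => intro st _; rfl
  | cons p rest ih =>
    intro st h
    have hstep : pvBStep capacity start_day rawPre schedPre st p = st := by
      simp only [pvBStep]
      by_cases hroom : 0 < capacity - st.1.getD p 0
      · rw [if_pos hroom, if_neg (by omega)]
      · rw [if_neg hroom]
    rw [List.foldl_cons, hstep, ih st h]

-- A's break-on-done inner recursion equals B's break-free fold with the prefix arrays,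
-- carrying the snapshot-agreement invariant down the descending scan
lemma inner_eq (capacity raw start_day : Int) (fr plan₀ : PySem.Dict Int Int) (L Hp : Nat) :
    ∀ (ps : List Int) (plan : PySem.Dict Int Int) (tp : Int),
    (∀ p ∈ ps, start_day ≤ p ∧ p - start_day + 1 ≤ (L : Int) ∧ p - start_day ≤ (Hp : Int)) →
    ps.Pairwise (fun a b => b < a) →
    (∀ q, start_day ≤ q → (∃ p ∈ ps, q < p) → plan.getD q 0 = plan₀.getD q 0) →
    (pvAInner capacity raw start_day fr ps plan tp).1
      = (ps.foldl (pvBStep capacity start_day (pvBPrefix fr L start_day raw)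
          (pvBPrefix plan₀ Hp start_day 0)) (plan, tp)).1 := by
  intro ps
  induction ps with
  | nil => intro plan tp _ _ _; rfl
  | cons p rest ih =>
    intro plan tp hmem hpw hag
    have hp := hmem p (by simp)
    have hpw' := List.pairwise_cons.mp hpw
    have hmem' : ∀ p' ∈ rest, start_day ≤ p' ∧ p' - start_day + 1 ≤ (L : Int) ∧ p' - start_day ≤ (Hp : Int) := by
      intro p' h; exact hmem p' (by simp [h])
    have hag' : ∀ q, start_day ≤ q → (∃ p' ∈ rest, q < p') → plan.getD q 0 = plan₀.getD q 0 := by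
      intro q hq ⟨p', hp', hqp⟩; exact hag q hq ⟨p', by simp [hp'], hqp⟩
    have hav := avail_raw_eq fr plan plan₀ start_day p raw L Hp hp.1 hp.2.1 hp.2.2
      (fun q hq hqp => hag q hq ⟨p, by simp, hqp⟩)
    rw [List.foldl_cons]
    simp only [pvAInner, pvBStep, hav]
    set F := (PySem.List.pyGet? (pvBPrefix fr L start_day raw) (p - start_day + 1)).getD 0
      - (PySem.List.pyGet? (pvBPrefix plan₀ Hp start_day 0) (p - start_day)).getD 0 with hF
    by_cases hcap : capacity - plan.getD p 0 ≤ 0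
    · rw [if_pos hcap, if_neg (show ¬ 0 < capacity - plan.getD p 0 by omega)]
      exact ih plan tp hmem' hpw'.2 hag'
    · rw [if_neg hcap, if_pos (show 0 < capacity - plan.getD p 0 by omega)]
      by_cases htake : min (capacity - plan.getD p 0) (min F tp) ≤ 0
      · rw [if_pos htake, if_neg (show ¬ 0 < min (capacity - plan.getD p 0) (min F tp) by omega)]
        exact ih plan tp hmem' hpw'.2 hag'
      · rw [if_neg htake, if_pos (show 0 < min (capacity - plan.getD p 0) (min F tp) by omega)]
        by_cases hdone : tp - min (capacity - plan.getD p 0) (min F tp) ≤ 0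
        · rw [if_pos hdone, fill_stuck capacity start_day _ _ rest _ hdone]
        · rw [if_neg hdone]
          apply ih _ _ hmem' hpw'.2
          intro q hq ⟨p', hp', hqp⟩
          have hq_ne : q ≠ p := by
            have := hpw'.1 p' hp'
            omega
          rw [PySem.Dict.getD_insert_of_ne _ _ _ hq_ne]
          exact hag q hq ⟨p', by simp [hp'], hqp⟩

-- every shortfall day comes from the day list and lies at or after start_day
lemma needs_mem (start_day horizon : Int) (fpd : PySem.Dict Int Int) :
    ∀ (days : List Int) (prod : Int) (x : Int × Int),
    x ∈ pvBNeeds start_day horizon fpd days prod → x.1 ∈ days ∧ start_day ≤ x.1 := by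
  intro days
  induction days with
  | nil => intro prod x hx; simp [pvBNeeds] at hx
  | cons d rest ih =>
    intro prod x hx
    simp only [pvBNeeds] at hx
    split at hx
    · rename_i hin
      split at hx
      · rcases List.mem_cons.mp hx with h | h
        · subst h; exact ⟨by simp, hin.1⟩
        · have := ih 0 x h; exact ⟨by simp [this.1], this.2⟩
      · have := ih _ x hx; exact ⟨by simp [this.1], this.2⟩
    · have := ih prod x hx; exact ⟨by simp [this.1], this.2⟩

-- the shortfall list inherits the descending order of the day list
lemma needs_pairwise (start_day horizon : Int) (fpd : PySem.Dict Int Int) :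
    ∀ (days : List Int) (prod : Int), days.Pairwise (fun a b => b ≤ a) →
    (pvBNeeds start_day horizon fpd days prod).Pairwise (fun a b => b.1 ≤ a.1) := by
  intro days
  induction days with
  | nil => intro prod _; simp [pvBNeeds]
  | cons d rest ih =>
    intro prod hpw
    have hpw' := List.pairwise_cons.mp hpw
    simp only [pvBNeeds]
    split
    · split
      · refine List.pairwise_cons.mpr ⟨?_, ih 0 hpw'.2⟩
        intro x hx
        exact le_trans (hpw'.1 x.1 (needs_mem _ _ _ rest 0 x hx).1) (le_refl d)
      · exact ih _ hpw'.2
    · exact ih prod hpw'.2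

-- the outer loops agree: A's fused pass equals stage 1 (pvBNeeds) followed by stage 2
-- (pvBSched), provided the prefix array covers every shortfall day
lemma outer_eq (start_day horizon capacity raw : Int) (fr fpd : PySem.Dict Int Int) (L : Nat) :
    ∀ (days : List Int) (plan : PySem.Dict Int Int) (prod : Int),
    days.Pairwise (fun a b => b ≤ a) →
    (∀ x ∈ pvBNeeds start_day horizon fpd days prod, x.1 - start_day ≤ (L : Int)) →
    pvAOuter start_day horizon capacity raw fr fpd days plan prod
      = pvBSched start_day capacity (pvBPrefix fr L start_day raw)
          (pvBNeeds start_day horizon fpd days prod) plan := by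
  intro days
  induction days with
  | nil => intro plan prod _ _; rfl
  | cons d rest ih =>
    intro plan prod hpw hcov
    have hpw' := List.pairwise_cons.mp hpw
    simp only [pvAOuter, pvBNeeds]
    by_cases hout : d < start_day ∨ start_day + horizon ≤ d
    · rw [if_pos hout, if_neg (show ¬(start_day ≤ d ∧ d < start_day + horizon) by omega)]
      exact ih plan prod hpw'.2 (by
        intro x hx
        apply hcov
        simp only [pvBNeeds]
        rw [if_neg (show ¬(start_day ≤ d ∧ d < start_day + horizon) by omega)]
        exact hx)
    · rw [if_neg hout, if_pos (show start_day ≤ d ∧ d < start_day + horizon by omega)]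
      by_cases hcovd : fpd.getD d 0 ≤ prod
      · rw [if_pos hcovd, if_neg (show ¬ prod < fpd.getD d 0 by omega)]
        exact ih plan (prod - fpd.getD d 0) hpw'.2 (by
          intro x hx
          apply hcov
          simp only [pvBNeeds]
          rw [if_pos (show start_day ≤ d ∧ d < start_day + horizon by omega),
            if_neg (show ¬ prod < fpd.getD d 0 by omega)]
          exact hx)
      · rw [if_neg hcovd, if_pos (show prod < fpd.getD d 0 by omega)]
        have hdL : d - start_day ≤ (L : Int) := by
          have := hcov (d, fpd.getD d 0 - prod) (by
            simp only [pvBNeeds]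
            rw [if_pos (show start_day ≤ d ∧ d < start_day + horizon by omega),
              if_pos (show prod < fpd.getD d 0 by omega)]
            exact List.mem_cons_self)
          simpa using this
        have hds : start_day ≤ d := by omega
        simp only [pvBSched, pvBFill]
        rw [← inner_eq capacity raw start_day fr plan L (d - start_day).toNat
          (PySem.List.pyRange (d - 1) (start_day - 1) (-1)) plan (fpd.getD d 0 - prod)
          (by
            intro p hp
            rw [PySem.List.mem_pyRange_neg_one] at hp
            refine ⟨by omega, by omega, by omega⟩)
          (by
            rw [PySem.List.pyRange_neg_one_eq_reverse, List.pairwise_reverse]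
            exact PySem.List.pairwise_lt_pyRange_one (start_day - 1 + 1) (d - 1 + 1))
          (by intro q _ _; rfl)]
        exact ih _ 0 hpw'.2 (by
          intro x hx
          apply hcov
          simp only [pvBNeeds]
          rw [if_pos (show start_day ≤ d ∧ d < start_day + horizon by omega),
            if_pos (show prod < fpd.getD d 0 by omega)]
          exact List.mem_cons_of_mem _ hx)

-- ===== VERDICT (by name: the statement is the Claim_ definition above) =====
theorem jit_production_plan_abs_spec : Claim_equal_jit_production_plan_abs := by
  intro start_day horizon capacity inv_raw inv_prod fr_l fp_l _
  unfold Spec_jit_production_plan_abs jit_production_plan_abs jit_production_plan_abs_alt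
  have hdpw : (PySem.List.sorted (PySem.Dict.ofList fp_l).keys (fun x : Int => x) true).Pairwise
      (fun a b => b ≤ a) := PySem.List.sorted_pairwise_rev _ _
  cases hneeds : pvBNeeds start_day horizon (PySem.Dict.ofList fp_l)
      (PySem.List.sorted (PySem.Dict.ofList fp_l).keys (fun x => x) true) inv_prod with
  | nil =>
    have h := outer_eq start_day horizon capacity inv_raw (PySem.Dict.ofList fr_l)
      (PySem.Dict.ofList fp_l) 0
      (PySem.List.sorted (PySem.Dict.ofList fp_l).keys (fun x => x) true)
      PySem.Dict.empty inv_prod hdpw (by rw [hneeds]; intro x hx; simp at hx)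
    rw [hneeds] at h
    simp only [hneeds, h]
    rfl
  | cons hd tl =>
    obtain ⟨d0, t0⟩ := hd
    have hnpw := needs_pairwise start_day horizon (PySem.Dict.ofList fp_l)
      (PySem.List.sorted (PySem.Dict.ofList fp_l).keys (fun x => x) true) inv_prod hdpw
    rw [hneeds] at hnpw
    have hhd := needs_mem start_day horizon (PySem.Dict.ofList fp_l)
      (PySem.List.sorted (PySem.Dict.ofList fp_l).keys (fun x => x) true) inv_prod (d0, t0)
      (by rw [hneeds]; exact List.mem_cons_self)
    have hcov : ∀ x ∈ pvBNeeds start_day horizon (PySem.Dict.ofList fp_l)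
        (PySem.List.sorted (PySem.Dict.ofList fp_l).keys (fun x => x) true) inv_prod,
        x.1 - start_day ≤ (((d0 - start_day).toNat : Nat) : Int) := by
      rw [hneeds]
      intro x hx
      rcases List.mem_cons.mp hx with h | h
      · subst h
        have := hhd.2
        omega
      · have h1 := (List.pairwise_cons.mp hnpw).1 x h
        have := hhd.2
        omega
    have h := outer_eq start_day horizon capacity inv_raw (PySem.Dict.ofList fr_l)
      (PySem.Dict.ofList fp_l) (d0 - start_day).toNat
      (PySem.List.sorted (PySem.Dict.ofList fp_l).keys (fun x => x) true)
      PySem.Dict.empty inv_prod hdpw hcov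
    rw [hneeds] at h
    simp only [hneeds, h]
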